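-- pv_equiv track=rewrite | github.com/Olivera2708/Codeforces | #760/missing_bigram.py | uradi
-- ===== SOURCE A (Python) =====
-- def uradi(broj, unos):
--     rec = ""
--     for i in range(broj-2):
--         if i == 0:
--             rec += unos[i][0]
--         if i == broj-3:
--             rec += unos[i][1]
--             continue
--         if unos[i][1] == unos[i+1][0]:
--             rec += unos[i][1]
--         else:
--             rec += unos[i][1]
--             rec += unos[i+1][0]
--     if len(rec) != broj:
--         rec += "a"
--     return rec
-- ===== SOURCE B (Python) =====
-- def uradi(broj, unos):
--     m = broj - 2
--     if m <= 0:
--         rec = ""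
--     else:
--         body = [unos[0][0]] + [unos[i][1] for i in range(m)]
--         gaps = {}
--         for i in range(m - 1):
--             if unos[i][1] != unos[i + 1][0]:
--                 gaps[i + 1] = unos[i + 1][0]
--         out = []
--         for j, ch in enumerate(body):
--             out.append(ch)
--             if j in gaps:
--                 out.append(gaps[j])
--         rec = "".join(out)
--     if len(rec) != broj:
--         rec += "a"
--     return rec
-- ===== Notes on version B (the rewrite author's own statement) =====
-- stated objective: alternative
-- what changed: B replaces A's single look-ahead loop with a different decomposition: it builds a body list (leading char plus every bigram's second char) and a separate dict of gap insertions keyed by body position, then emits the string by walking the body; A's crash inputs (fewer than broj-2 bigrams, or a bigram shorter than 2 chars) are outside Pre_.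
import Mathlib
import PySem

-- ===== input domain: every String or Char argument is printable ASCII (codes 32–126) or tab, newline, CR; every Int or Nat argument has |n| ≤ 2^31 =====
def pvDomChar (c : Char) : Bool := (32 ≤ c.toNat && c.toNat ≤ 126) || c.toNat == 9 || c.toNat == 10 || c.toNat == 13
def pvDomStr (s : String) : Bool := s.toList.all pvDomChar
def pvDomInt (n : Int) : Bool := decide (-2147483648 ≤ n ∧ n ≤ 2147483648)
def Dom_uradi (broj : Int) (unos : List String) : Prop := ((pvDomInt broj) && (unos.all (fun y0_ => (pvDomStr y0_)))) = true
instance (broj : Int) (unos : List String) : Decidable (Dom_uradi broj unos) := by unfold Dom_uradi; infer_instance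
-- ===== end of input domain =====

-- B rebuilds the string by a different decomposition: a body list (first char + every bigram's
-- second char) plus a dict of gap insertions, instead of A's single look-ahead loop; objective: alternative.

-- ===== PORT A =====
-- unos[i][j] on the List-Char side; total via defaults, exact under Pre_uradi (all indices in range)
def chAt (bs : List (List Char)) (i j : Int) : Char :=
  PySem.List.pyGetD (PySem.List.pyGetD bs i []) j '?'

def uradi (broj : Int) (unos : List String) : String :=
  let bs := unos.map String.toList
  let rec0 := (PySem.List.pyRange 0 (broj - 2) 1).foldl (fun r i =>
    let r1 := if i = 0 then r ++ [chAt bs i 0] else r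
    if i = broj - 3 then r1 ++ [chAt bs i 1]
    else if chAt bs i 1 = chAt bs (i + 1) 0 then r1 ++ [chAt bs i 1]
    else (r1 ++ [chAt bs i 1]) ++ [chAt bs (i + 1) 0]) []
  let rec1 := if (rec0.length : Int) ≠ broj then rec0 ++ ['a'] else rec0
  String.ofList rec1

-- ===== PORT B =====
def uradi_alt (broj : Int) (unos : List String) : String :=
  let bs := unos.map String.toList
  let m := broj - 2
  let rec0 :=
    if m ≤ 0 then ([] : List Char)
    else
      let body := chAt bs 0 0 :: (PySem.List.pyRange 0 m 1).map (fun i => chAt bs i 1)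
      let gaps := (PySem.List.pyRange 0 (m - 1) 1).foldl (fun d i =>
        if chAt bs i 1 ≠ chAt bs (i + 1) 0 then d.insert (i + 1) (chAt bs (i + 1) 0) else d)
        (PySem.Dict.empty : PySem.Dict Int Char)
      (PySem.List.enumerate body 0).foldl (fun out jc =>
        let out1 := out ++ [jc.2]
        match gaps.get? jc.1 with
        | some g => out1 ++ [g]
        | none => out1) []
  let rec1 := if (rec0.length : Int) ≠ broj then rec0 ++ ['a'] else rec0
  String.ofList rec1

-- ===== PRECONDITION & SPEC =====
-- Pre_ excludes exactly the inputs where A raises IndexError: fewer than broj-2 bigrams, or one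
-- of the first broj-2 strings shorter than 2 characters.
def Pre_uradi (broj : Int) (unos : List String) : Prop :=
  broj - 2 ≤ 0 ∨ (broj - 2 ≤ (unos.length : Int) ∧
    ∀ s ∈ unos.take (broj - 2).toNat, 2 ≤ s.toList.length)
instance (broj : Int) (unos : List String) : Decidable (Pre_uradi broj unos) := by
  unfold Pre_uradi; infer_instance

def pvWitness_uradi : Int × List String := (4, ["ab", "bc"])

def Spec_uradi (broj : Int) (unos : List String) (out : String) : Prop := out = uradi_alt broj unos
instance (broj : Int) (unos : List String) (out : String) : Decidable (Spec_uradi broj unos out) := by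
  unfold Spec_uradi; infer_instance

-- ===== CLAIM (what is proved, stated in full; the proofs are below) =====
def Claim_equal_uradi : Prop := ∀ (broj : Int) (unos : List String),
  Dom_uradi broj unos → Pre_uradi broj unos → Spec_uradi broj unos (uradi broj unos)

-- ===== LEMMAS AND PROOFS =====

-- the common shape of both loops' output (proof-side only)
def pvSeg (bs : List (List Char)) (κ : Nat) (i : Nat) : List Char :=
  chAt bs i 1 :: (if i + 1 < κ ∧ chAt bs i 1 ≠ chAt bs (i + 1) 0 then [chAt bs (i + 1) 0] else [])

def pvSpec (bs : List (List Char)) (κ : Nat) : List Char :=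
  chAt bs 0 0 :: (List.range κ).flatMap (pvSeg bs κ)

lemma gA_eq (bs : List (List Char)) (κ i : Nat) (hi : i < κ) :
    (if (i : Int) = (κ : Int) - 1 then [chAt bs (i : Int) 1]
     else if chAt bs (i : Int) 1 = chAt bs ((i : Int) + 1) 0 then [chAt bs (i : Int) 1]
     else [chAt bs (i : Int) 1, chAt bs ((i : Int) + 1) 0]) = pvSeg bs κ i := by
  unfold pvSeg
  by_cases hlast : (i : Int) = (κ : Int) - 1
  · rw [if_pos hlast, if_neg (fun hc => absurd hc.1 (by omega))]
  · have hi1 : i + 1 < κ := by omega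
    rw [if_neg hlast]
    by_cases hc : chAt bs (i : Int) 1 = chAt bs ((i : Int) + 1) 0
    · rw [if_pos hc, if_neg (fun h => h.2 hc)]
    · rw [if_neg hc, if_pos ⟨hi1, hc⟩]

lemma A_loop_eq (bs : List (List Char)) (κ : Nat) (hκ : 1 ≤ κ) :
    (PySem.List.pyRange 0 (κ : Int) 1).foldl (fun r i =>
      if i = (κ : Int) - 1 then (if i = 0 then r ++ [chAt bs i 0] else r) ++ [chAt bs i 1]
      else if chAt bs i 1 = chAt bs (i + 1) 0 then (if i = 0 then r ++ [chAt bs i 0] else r) ++ [chAt bs i 1]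
      else (if i = 0 then r ++ [chAt bs i 0] else r) ++ [chAt bs i 1] ++ [chAt bs (i + 1) 0]) [] = pvSpec bs κ := by
  have hstep : (fun (r : List Char) (i : Int) =>
      if i = (κ : Int) - 1 then (if i = 0 then r ++ [chAt bs i 0] else r) ++ [chAt bs i 1]
      else if chAt bs i 1 = chAt bs (i + 1) 0 then (if i = 0 then r ++ [chAt bs i 0] else r) ++ [chAt bs i 1]
      else (if i = 0 then r ++ [chAt bs i 0] else r) ++ [chAt bs i 1] ++ [chAt bs (i + 1) 0]) =
      fun r i => r ++ ((if i = 0 then [chAt bs i 0] else []) ++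
        (if i = (κ : Int) - 1 then [chAt bs i 1]
         else if chAt bs i 1 = chAt bs (i + 1) 0 then [chAt bs i 1]
         else [chAt bs i 1, chAt bs (i + 1) 0])) := by
    funext r i
    split_ifs <;> simp
  rw [hstep, PySem.List.foldl_append_eq_flatMap, List.nil_append,
      PySem.List.pyRange_zero_natCast, List.flatMap_map]
  obtain ⟨k, rfl⟩ : ∃ k, κ = k + 1 := ⟨κ - 1, by omega⟩
  rw [List.range_succ_eq_map, List.flatMap_cons, List.flatMap_map]
  unfold pvSpec
  rw [List.range_succ_eq_map, List.flatMap_cons, List.flatMap_map]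
  rw [List.flatMap_congr (g := fun a => pvSeg bs (k + 1) a.succ) (fun a ha => by
    rw [if_neg (by have := List.mem_range.mp ha; omega : ¬ ((a.succ : Nat) : Int) = 0),
        List.nil_append, gA_eq bs (k + 1) a.succ (by simpa using List.mem_range.mp ha)])]
  have h0 := gA_eq bs (k + 1) 0 (by omega)
  simp only [Nat.cast_zero, zero_add] at h0 ⊢
  rw [if_pos trivial, h0]
  simp

lemma gaps_get (bs : List (List Char)) (n : Nat) (j : Int) :
    ((PySem.List.pyRange 0 (n : Int) 1).foldl (fun d i =>
        if chAt bs i 1 ≠ chAt bs (i + 1) 0 then d.insert (i + 1) (chAt bs (i + 1) 0) else d)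
      (PySem.Dict.empty : PySem.Dict Int Char)).get? j =
    if 1 ≤ j ∧ j ≤ (n : Int) ∧ chAt bs (j - 1) 1 ≠ chAt bs j 0 then some (chAt bs j 0)
    else none := by
  induction n with
  | zero =>
    rw [show ((0 : Nat) : Int) = 0 from rfl, PySem.List.pyRange_one_eq_nil le_rfl,
        List.foldl_nil, PySem.Dict.get?_empty, if_neg]
    rintro ⟨h1, h2, -⟩; omega
  | succ n ih =>
    rw [show ((n + 1 : Nat) : Int) = (n : Int) + 1 by push_cast; ring,
        PySem.List.pyRange_one_succ_right (Int.natCast_nonneg n), List.foldl_append,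
        List.foldl_cons, List.foldl_nil]
    by_cases hc : chAt bs (n : Int) 1 ≠ chAt bs ((n : Int) + 1) 0
    · rw [if_pos hc, PySem.Dict.get?_insert, ih]
      by_cases hj : j = (n : Int) + 1
      · subst hj
        rw [if_pos rfl, if_pos ⟨by omega, le_rfl,
          by simpa [show (n : Int) + 1 - 1 = (n : Int) by ring] using hc⟩]
      · rw [if_neg hj]
        have hiff : (1 ≤ j ∧ j ≤ (n : Int) ∧ chAt bs (j - 1) 1 ≠ chAt bs j 0) ↔
            (1 ≤ j ∧ j ≤ (n : Int) + 1 ∧ chAt bs (j - 1) 1 ≠ chAt bs j 0) :=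
          ⟨fun h => ⟨h.1, by omega, h.2.2⟩, fun h => ⟨h.1, by omega, h.2.2⟩⟩
        simp only [hiff]
    · rw [if_neg hc, ih]
      rw [not_not] at hc
      have hiff : (1 ≤ j ∧ j ≤ (n : Int) ∧ chAt bs (j - 1) 1 ≠ chAt bs j 0) ↔
          (1 ≤ j ∧ j ≤ (n : Int) + 1 ∧ chAt bs (j - 1) 1 ≠ chAt bs j 0) := by
        refine ⟨fun h => ⟨h.1, by omega, h.2.2⟩, fun h => ⟨h.1, ?_, h.2.2⟩⟩
        by_cases hj : j = (n : Int) + 1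
        · exfalso
          apply h.2.2
          rw [hj, show (n : Int) + 1 - 1 = (n : Int) by ring]
          exact hc
        · omega
      simp only [hiff]

lemma enum_map_range {α : Type} (f : Nat → α) (κ : Nat) (s : Int) :
    PySem.List.enumerate ((List.range κ).map f) s =
      (List.range κ).map (fun (i : Nat) => (s + (i : Int), f i)) := by
  induction κ with
  | zero => simp [PySem.List.enumerate_nil]
  | succ k ih =>
    rw [List.range_succ, List.map_append, PySem.List.enumerate_append, ih, List.map_append]
    simp [PySem.List.enumerate_cons, PySem.List.enumerate_nil]

lemma B_loop_eq (bs : List (List Char)) (κ : Nat) (hκ : 1 ≤ κ) :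
    (PySem.List.enumerate
        (chAt bs 0 0 :: (PySem.List.pyRange 0 (κ : Int) 1).map (fun i => chAt bs i 1)) 0).foldl
      (fun out jc =>
        match ((PySem.List.pyRange 0 ((κ : Int) - 1) 1).foldl (fun d i =>
            if chAt bs i 1 ≠ chAt bs (i + 1) 0 then d.insert (i + 1) (chAt bs (i + 1) 0) else d)
          (PySem.Dict.empty : PySem.Dict Int Char)).get? jc.1 with
        | some g => out ++ [jc.2] ++ [g]
        | none => out ++ [jc.2]) [] = pvSpec bs κ := by
  have hn : ((κ - 1 : Nat) : Int) = (κ : Int) - 1 := by omega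
  set gaps := ((PySem.List.pyRange 0 ((κ : Int) - 1) 1).foldl (fun d i =>
      if chAt bs i 1 ≠ chAt bs (i + 1) 0 then d.insert (i + 1) (chAt bs (i + 1) 0) else d)
    (PySem.Dict.empty : PySem.Dict Int Char)) with hgaps
  have hget : ∀ j : Int, gaps.get? j =
      if 1 ≤ j ∧ j ≤ (κ : Int) - 1 ∧ chAt bs (j - 1) 1 ≠ chAt bs j 0 then some (chAt bs j 0)
      else none := by
    intro j; rw [hgaps, ← hn, gaps_get, hn]
  have hstep : (fun (out : List Char) (jc : Int × Char) =>
      match gaps.get? jc.1 with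
      | some g => out ++ [jc.2] ++ [g]
      | none => out ++ [jc.2]) = fun out jc =>
      out ++ (jc.2 :: (match gaps.get? jc.1 with | some g => [g] | none => [])) := by
    funext out jc
    cases gaps.get? jc.1 <;> simp
  rw [hstep, PySem.List.foldl_append_eq_flatMap, List.nil_append,
      PySem.List.pyRange_zero_natCast, List.map_map, PySem.List.enumerate_cons,
      enum_map_range, List.flatMap_cons, List.flatMap_map]
  rw [show gaps.get? (0 : Int) = none by rw [hget]; exact if_neg (fun h => by omega)]
  rw [List.flatMap_congr (g := fun i => pvSeg bs κ i) (fun i hi => by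
    have hiκ : i < κ := List.mem_range.mp hi
    dsimp only [pvSeg]
    rw [hget, show (0 : Int) + 1 + (i : Int) - 1 = (i : Int) by ring,
        show (0 : Int) + 1 + (i : Int) = (i : Int) + 1 by ring]
    by_cases hc : chAt bs (i : Int) 1 ≠ chAt bs ((i : Int) + 1) 0
    · by_cases hlt : i + 1 < κ
      · rw [if_pos ⟨by omega, by omega, hc⟩, if_pos ⟨hlt, hc⟩]; rfl
      · rw [if_neg (fun h => by omega), if_neg (fun h => hlt h.1)]; rfl
    · rw [not_not] at hc
      rw [if_neg (fun h => h.2.2 hc), if_neg (fun h => h.2 hc)]; rfl)]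
  unfold pvSpec
  rfl

-- ===== VERDICT (by name: the statement is the Claim_ definition above) =====
theorem uradi_spec : Claim_equal_uradi := by
  intro broj unos _ _
  simp only [Spec_uradi, uradi, uradi_alt]
  by_cases hm : broj - 2 ≤ 0
  · simp only [PySem.List.pyRange_one_eq_nil hm, List.foldl_nil, if_pos hm]
  · set bs := unos.map String.toList with hbs
    obtain ⟨κ, hκ1, hκ⟩ : ∃ κ : Nat, 1 ≤ κ ∧ broj - 2 = (κ : Int) := by
      refine ⟨(broj - 2).toNat, by omega, by omega⟩
    have h3 : broj - 3 = (κ : Int) - 1 := by omega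
    simp only [hκ, h3, if_neg (by omega : ¬ (κ:Int) ≤ 0)]
    rw [A_loop_eq bs κ hκ1, B_loop_eq bs κ hκ1]
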